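-- pv_equiv track=rewrite | github.com/EphraimHaber/advent-of-code-2023 | day-3/part-2/main.py | get_filtered_line
-- ===== SOURCE A (Python) =====
-- def get_filtered_line(temp_line: str) -> str:
--     res = [c for c in temp_line]
--     replace = []
--     for i in range(1, len(res)):
--         if res[i].isdigit() and res[i - 1].isdigit():
--             replace.append(i)
--     for index in replace:
--         res[index] = '.'
--     return "".join(res)
-- ===== SOURCE B (Python) =====
-- def get_filtered_line(temp_line: str) -> str:
--     out = []
--     prev = False
--     for c in temp_line:
--         d = c.isdigit()
--         out.append('.' if prev and d else c)
--         prev = d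
--     return "".join(out)
-- ===== Notes on version B (the rewrite author's own statement) =====
-- stated objective: simpler
-- what changed: Single forward pass carrying one boolean (previous char is a digit) and emitting the output directly, instead of materialising a char list, collecting an index table of replacements in a range loop, and mutating the list at those indices.
import Mathlib
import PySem

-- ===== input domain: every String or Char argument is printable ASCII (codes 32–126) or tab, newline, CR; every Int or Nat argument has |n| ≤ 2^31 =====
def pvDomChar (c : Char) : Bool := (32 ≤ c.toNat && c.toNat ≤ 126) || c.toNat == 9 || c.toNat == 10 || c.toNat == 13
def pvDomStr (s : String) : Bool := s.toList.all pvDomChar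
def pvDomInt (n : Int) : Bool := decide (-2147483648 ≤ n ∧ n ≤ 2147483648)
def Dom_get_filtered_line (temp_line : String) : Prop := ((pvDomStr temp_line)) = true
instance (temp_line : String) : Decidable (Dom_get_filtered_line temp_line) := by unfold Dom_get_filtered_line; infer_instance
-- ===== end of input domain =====

-- B replaces A's three passes (char list, index-table loop, mutation loop) by one pass with a
-- 'previous char is a digit' boolean; objective: simpler, same behaviour.

-- ===== PORT A =====
def get_filtered_line (temp_line : String) : String :=
  let res := temp_line.toList
  let replace := (PySem.List.pyRange 1 (res.length : Int) 1).foldl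
    (fun acc i =>
      if PySem.Chars.isdigit (PySem.List.pyGetD res i ' ')
          && PySem.Chars.isdigit (PySem.List.pyGetD res (i - 1) ' ') then acc ++ [i] else acc) []
  let final := replace.foldl (fun r index => r.set index.toNat '.') res
  String.ofList final

-- ===== PORT B =====
def get_filtered_line_alt (temp_line : String) : String :=
  let st := temp_line.toList.foldl
    (fun (st : List Char × Bool) c =>
      let d := PySem.Chars.isdigit c
      (st.1 ++ [if st.2 && d then '.' else c], d)) ([], false)
  String.ofList st.1

-- ===== PRECONDITION & SPEC =====
def Spec_get_filtered_line (temp_line : String) (out : String) : Prop := out = get_filtered_line_alt temp_line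
instance (temp_line : String) (out : String) : Decidable (Spec_get_filtered_line temp_line out) := by unfold Spec_get_filtered_line; infer_instance

-- ===== CLAIM (what is proved, stated in full; the proofs are below) =====
def Claim_equal_get_filtered_line : Prop := ∀ (temp_line : String), Dom_get_filtered_line temp_line → Spec_get_filtered_line temp_line (get_filtered_line temp_line)

-- ===== LEMMAS AND PROOFS =====

-- recursive form of B's loop body (proof helper)
def altGo (prev : Bool) : List Char → List Char
  | [] => []
  | c :: cs => (if prev && PySem.Chars.isdigit c then '.' else c) :: altGo (PySem.Chars.isdigit c) cs

theorem altGo_foldl (l : List Char) : ∀ (acc : List Char) (prev : Bool),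
    (l.foldl (fun (st : List Char × Bool) c =>
      let d := PySem.Chars.isdigit c
      (st.1 ++ [if st.2 && d then '.' else c], d)) (acc, prev)).1 = acc ++ altGo prev l := by
  induction l with
  | nil => intro acc prev; simp [altGo]
  | cons c cs ih =>
    intro acc prev
    simp only [List.foldl_cons]
    exact (ih _ _).trans (by simp [altGo])

theorem altGo_length (prev : Bool) (l : List Char) : (altGo prev l).length = l.length := by
  induction l generalizing prev with
  | nil => rfl
  | cons c cs ih => simp [altGo, ih]

theorem altGo_getElem (l : List Char) : ∀ (prev : Bool) (j : Nat) (hj : j < l.length),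
    (altGo prev l)[j]'(by rw [altGo_length]; exact hj) =
      if PySem.Chars.isdigit l[j] &&
          (if j = 0 then prev else PySem.Chars.isdigit (l[j-1]'(by omega))) then '.' else l[j] := by
  induction l with
  | nil => intro _ j hj; simp at hj
  | cons c cs ih =>
    intro prev j hj
    cases j with
    | zero => simp [altGo, Bool.and_comm]
    | succ j =>
      simp only [altGo, List.getElem_cons_succ]
      rw [ih (PySem.Chars.isdigit c) j (by simpa using hj)]
      cases j with
      | zero => simp
      | succ j => simp

theorem foldl_set_length (is : List Int) : ∀ (r : List Char),
    (is.foldl (fun r (index : Int) => r.set index.toNat '.') r).length = r.length := by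
  induction is with
  | nil => intro r; rfl
  | cons i is ih => intro r; simp [List.foldl_cons, ih]

theorem foldl_set_getElem (is : List Int) : ∀ (r : List Char), (∀ i ∈ is, 0 ≤ i) →
    ∀ (j : Nat) (hj : j < r.length),
    (is.foldl (fun r (index : Int) => r.set index.toNat '.') r)[j]'(by rw [foldl_set_length]; exact hj) =
      if (j : Int) ∈ is then '.' else r[j] := by
  induction is with
  | nil => intro r _ j hj; simp
  | cons i is ih =>
    intro r hnn j hj
    simp only [List.foldl_cons]
    rw [ih (r.set i.toNat '.') (fun x hx => hnn x (List.mem_cons_of_mem _ hx)) j (by simpa using hj)]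
    have h0 : 0 ≤ i := hnn i (List.mem_cons_self ..)
    by_cases hmem : (j : Int) ∈ is
    · simp [hmem]
    · simp only [hmem, if_false, List.mem_cons, List.getElem_set]
      by_cases hij : (j : Int) = i
      · have : i.toNat = j := by omega
        simp [this, hij]
      · have : i.toNat ≠ j := by omega
        simp [this, hij]

theorem main_lists (l : List Char) :
    ((PySem.List.pyRange 1 (l.length : Int) 1).foldl
      (fun acc i =>
        if PySem.Chars.isdigit (PySem.List.pyGetD l i ' ')
            && PySem.Chars.isdigit (PySem.List.pyGetD l (i - 1) ' ') then acc ++ [i] else acc) []).foldl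
      (fun r (index : Int) => r.set index.toNat '.') l = altGo false l := by
  set p : Int → Bool := fun i =>
    PySem.Chars.isdigit (PySem.List.pyGetD l i ' ')
      && PySem.Chars.isdigit (PySem.List.pyGetD l (i - 1) ' ') with hp
  have hfil : (PySem.List.pyRange 1 (l.length : Int) 1).foldl
      (fun acc i => if p i then acc ++ [i] else acc) [] =
      (PySem.List.pyRange 1 (l.length : Int) 1).filter p := by
    rw [PySem.List.foldl_append_if]; simp
  rw [hfil]
  have hnn : ∀ i ∈ (PySem.List.pyRange 1 (l.length : Int) 1).filter p, 0 ≤ i := by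
    intro i hi
    have := (List.mem_filter.mp hi).1
    rw [PySem.List.mem_pyRange_one] at this
    omega
  apply List.ext_getElem
  · rw [foldl_set_length, altGo_length]
  · intro j hj hj2
    have hjl : j < l.length := by rwa [foldl_set_length] at hj
    rw [foldl_set_getElem _ l hnn j hjl,
        altGo_getElem l false j hjl]
    by_cases hmem : (j : Int) ∈ (PySem.List.pyRange 1 (l.length : Int) 1).filter p
    · -- membership gives 1 ≤ j, p j
      rcases List.mem_filter.mp hmem with ⟨hrange, hpj⟩
      rw [PySem.List.mem_pyRange_one] at hrange
      have hj1 : 1 ≤ j := by exact_mod_cast hrange.1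
      have hg1 : PySem.List.pyGetD l (j : Int) ' ' = l[j] := by
        simp [PySem.List.pyGetD_natCast, hjl]
      have hg2 : PySem.List.pyGetD l ((j : Int) - 1) ' ' = l[j-1]'(by omega) := by
        have : ((j : Int) - 1) = ((j - 1 : Nat) : Int) := by omega
        rw [this]
        simp [PySem.List.pyGetD_natCast, Nat.lt_of_le_of_lt (Nat.sub_le j 1) hjl]
      rw [hp] at hpj
      simp only [hg1, hg2] at hpj
      have hjne : ¬ (j = 0) := by omega
      simp [hmem, hjne, Bool.and_eq_true] at *
      simp [hpj.1, hpj.2]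
    · simp only [hmem, if_false]
      by_cases hj0 : j = 0
      · simp [hj0]
      · -- j ≥ 1 and ¬ p j
        have hj1 : 1 ≤ j := by omega
        have hrange : (j : Int) ∈ PySem.List.pyRange 1 (l.length : Int) 1 := by
          rw [PySem.List.mem_pyRange_one]; omega
        have hpj : ¬ p (j : Int) = true := by
          intro hpj; exact hmem (List.mem_filter.mpr ⟨hrange, hpj⟩)
        have hg1 : PySem.List.pyGetD l (j : Int) ' ' = l[j] := by
          simp [PySem.List.pyGetD_natCast, hjl]
        have hg2 : PySem.List.pyGetD l ((j : Int) - 1) ' ' = l[j-1]'(by omega) := by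
          have : ((j : Int) - 1) = ((j - 1 : Nat) : Int) := by omega
          rw [this]
          simp [PySem.List.pyGetD_natCast, Nat.lt_of_le_of_lt (Nat.sub_le j 1) hjl]
        rw [hp] at hpj
        simp only [hg1, hg2, Bool.and_eq_true] at hpj
        cases h1 : PySem.Chars.isdigit l[j] <;>
          cases h2 : PySem.Chars.isdigit (l[j-1]'(by omega)) <;> simp_all

-- ===== VERDICT (by name: the statement is the Claim_ definition above) =====
theorem get_filtered_line_spec : Claim_equal_get_filtered_line := by
  intro s _
  unfold Spec_get_filtered_line get_filtered_line get_filtered_line_alt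
  simp only []
  rw [altGo_foldl s.toList [] false, List.nil_append, main_lists s.toList]
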